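-- pv_equiv track=rewrite | github.com/RonaldWee/travel_planner | backend/utils/formatter.py | categorize_attractions
-- ===== SOURCE A (Python) =====
-- from typing import Dict, List, Any
--
-- def categorize_attractions(attractions: List[Dict]) -> Dict[str, List[Dict]]:
--     """
--     Categorize attractions by type
--
--     Categories:
--     - Culture (temples, shrines, museums)
--     - Landmarks (monuments, viewpoints)
--     - Nature (parks, gardens)
--     - Food (restaurants, markets)
--     - Shopping (malls, districts)
--     - Entertainment (theaters, venues)
--     """
--     categories = {
--         "culture": [],
--         "landmarks": [],
--         "nature": [],
--         "food": [],
--         "shopping": [],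
--         "entertainment": [],
--         "other": []
--     }
--
--     for attraction in attractions:
--         types = attraction.get("types", [])
--
--         # Categorize based on types
--         if any(t in types for t in ["museum", "art_gallery", "hindu_temple", "church", "synagogue", "mosque"]):
--             categories["culture"].append(attraction)
--         elif any(t in types for t in ["tourist_attraction", "point_of_interest", "establishment"]):
--             categories["landmarks"].append(attraction)
--         elif any(t in types for t in ["park", "natural_feature", "campground"]):
--             categories["nature"].append(attraction)
--         elif any(t in types for t in ["restaurant", "cafe", "food", "bar"]):
--             categories["food"].append(attraction)
--         elif any(t in types for t in ["shopping_mall", "store", "clothing_store"]):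
--             categories["shopping"].append(attraction)
--         elif any(t in types for t in ["night_club", "movie_theater", "casino"]):
--             categories["entertainment"].append(attraction)
--         else:
--             categories["other"].append(attraction)
--
--     # Remove empty categories
--     return {k: v for k, v in categories.items() if v}
-- ===== SOURCE B (Python) =====
-- # Inverted keyword->(category, rank) index scanned once per attraction (min-rank pick)
-- # instead of the ordered if/elif chain of per-category any() tests.
--
-- _CATS = [
--     ("culture", ["museum", "art_gallery", "hindu_temple", "church", "synagogue", "mosque"]),
--     ("landmarks", ["tourist_attraction", "point_of_interest", "establishment"]),
--     ("nature", ["park", "natural_feature", "campground"]),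
--     ("food", ["restaurant", "cafe", "food", "bar"]),
--     ("shopping", ["shopping_mall", "store", "clothing_store"]),
--     ("entertainment", ["night_club", "movie_theater", "casino"]),
-- ]
--
-- KEYWORD_RANK = [(kw, cat, rank) for rank, (cat, kws) in enumerate(_CATS) for kw in kws]
--
--
-- def categorize_attractions(attractions):
--     buckets = {cat: [] for cat, _ in _CATS}
--     buckets["other"] = []
--     for attraction in attractions:
--         types = attraction.get("types", [])
--         best_cat, best_rank = "other", 6
--         for kw, cat, rank in KEYWORD_RANK:
--             if rank < best_rank and kw in types:
--                 best_cat, best_rank = cat, rank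
--         buckets[best_cat].append(attraction)
--     return {k: v for k, v in buckets.items() if v}
-- ===== Notes on version B (the rewrite author's own statement) =====
-- stated objective: alternative
-- what changed: Replaced the ordered if/elif chain of per-category any() membership tests by a precomputed flat keyword->(category,rank) index scanned once per attraction keeping the minimum-rank match (disjoint keyword sets make min-rank reproduce the elif priority).
import Mathlib
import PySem

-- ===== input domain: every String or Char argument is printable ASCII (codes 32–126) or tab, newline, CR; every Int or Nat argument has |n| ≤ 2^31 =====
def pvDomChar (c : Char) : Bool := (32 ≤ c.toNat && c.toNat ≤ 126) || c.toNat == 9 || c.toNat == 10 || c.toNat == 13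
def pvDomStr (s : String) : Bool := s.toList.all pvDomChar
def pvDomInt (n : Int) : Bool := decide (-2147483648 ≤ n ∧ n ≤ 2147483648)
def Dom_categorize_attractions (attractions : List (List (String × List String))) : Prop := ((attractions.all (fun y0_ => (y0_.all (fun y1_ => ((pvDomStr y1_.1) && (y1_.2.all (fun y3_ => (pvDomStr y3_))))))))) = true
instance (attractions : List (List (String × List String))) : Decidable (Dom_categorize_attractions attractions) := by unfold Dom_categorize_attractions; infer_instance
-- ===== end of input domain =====

-- B replaces A's ordered if/elif chain by a precomputed keyword -> (category, rank)
-- index scanned once per attraction keeping the minimum-rank match (alternative decomposition).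

-- ===== PORT A =====
def categorize_attractions (attractions : List (List (String × List String))) : List (String × List (List (String × List String))) :=
  let categories : PySem.Dict String (List (List (String × List String))) :=
    PySem.Dict.ofList [("culture", []), ("landmarks", []), ("nature", []), ("food", []), ("shopping", []), ("entertainment", []), ("other", [])]
  let categories := attractions.foldl (fun cats attraction =>
    let types := (PySem.Dict.mk attraction).getD "types" []
    if List.any ["museum", "art_gallery", "hindu_temple", "church", "synagogue", "mosque"] (fun t => types.contains t) then
      cats.modify "culture" [] (· ++ [attraction])
    else if List.any ["tourist_attraction", "point_of_interest", "establishment"] (fun t => types.contains t) then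
      cats.modify "landmarks" [] (· ++ [attraction])
    else if List.any ["park", "natural_feature", "campground"] (fun t => types.contains t) then
      cats.modify "nature" [] (· ++ [attraction])
    else if List.any ["restaurant", "cafe", "food", "bar"] (fun t => types.contains t) then
      cats.modify "food" [] (· ++ [attraction])
    else if List.any ["shopping_mall", "store", "clothing_store"] (fun t => types.contains t) then
      cats.modify "shopping" [] (· ++ [attraction])
    else if List.any ["night_club", "movie_theater", "casino"] (fun t => types.contains t) then
      cats.modify "entertainment" [] (· ++ [attraction])
    else
      cats.modify "other" [] (· ++ [attraction])) categories
  categories.items.filter (fun kv => !kv.2.isEmpty)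

-- ===== PORT B =====
def pvCats : List (String × List String) :=
  [("culture", ["museum", "art_gallery", "hindu_temple", "church", "synagogue", "mosque"]),
   ("landmarks", ["tourist_attraction", "point_of_interest", "establishment"]),
   ("nature", ["park", "natural_feature", "campground"]),
   ("food", ["restaurant", "cafe", "food", "bar"]),
   ("shopping", ["shopping_mall", "store", "clothing_store"]),
   ("entertainment", ["night_club", "movie_theater", "casino"])]

def pvKeywordRank : List (String × String × Int) :=
  (PySem.List.enumerate pvCats 0).flatMap (fun p => p.2.2.map (fun kw => (kw, p.2.1, p.1)))

def categorize_attractions_alt (attractions : List (List (String × List String))) : List (String × List (List (String × List String))) :=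
  let buckets : PySem.Dict String (List (List (String × List String))) :=
    PySem.Dict.ofList ((pvCats.map (fun c => (c.1, ([] : List (List (String × List String)))))) ++ [("other", [])])
  let buckets := attractions.foldl (fun b attraction =>
    let types := (PySem.Dict.mk attraction).getD "types" []
    let best := pvKeywordRank.foldl
      (fun (best : String × Int) (e : String × String × Int) =>
        if e.2.2 < best.2 ∧ types.contains e.1 = true then (e.2.1, e.2.2) else best)
      ("other", 6)
    b.modify best.1 [] (· ++ [attraction])) buckets
  buckets.items.filter (fun kv => !kv.2.isEmpty)

-- ===== PRECONDITION & SPEC =====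
def Spec_categorize_attractions (attractions : List (List (String × List String))) (out : List (String × List (List (String × List String)))) : Prop := out = categorize_attractions_alt attractions
instance (attractions : List (List (String × List String))) (out : List (String × List (List (String × List String)))) : Decidable (Spec_categorize_attractions attractions out) := by unfold Spec_categorize_attractions; infer_instance

-- ===== CLAIM (what is proved, stated in full; the proofs are below) =====
def Claim_equal_categorize_attractions : Prop := ∀ (attractions : List (List (String × List String))), Dom_categorize_attractions attractions → Spec_categorize_attractions attractions (categorize_attractions attractions)

-- ===== LEMMAS AND PROOFS =====

-- the inverted index is the six keyword groups tagged with their category and rank, in order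
theorem pvKeywordRank_eq :
    pvKeywordRank =
      (["museum", "art_gallery", "hindu_temple", "church", "synagogue", "mosque"].map (fun k => (k, "culture", (0 : Int)))) ++
      (["tourist_attraction", "point_of_interest", "establishment"].map (fun k => (k, "landmarks", (1 : Int)))) ++
      (["park", "natural_feature", "campground"].map (fun k => (k, "nature", (2 : Int)))) ++
      (["restaurant", "cafe", "food", "bar"].map (fun k => (k, "food", (3 : Int)))) ++
      (["shopping_mall", "store", "clothing_store"].map (fun k => (k, "shopping", (4 : Int)))) ++
      (["night_club", "movie_theater", "casino"].map (fun k => (k, "entertainment", (5 : Int)))) := by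
  decide

-- one keyword group of a common rank r either captures the state (if r beats it and a keyword matches) or leaves it unchanged
theorem grp_fold (types : List String) (kws : List String) (cat : String) (r : Int) (b : String × Int) :
    List.foldl
      (fun (best : String × Int) (e : String × String × Int) =>
        if e.2.2 < best.2 ∧ types.contains e.1 = true then (e.2.1, e.2.2) else best)
      b (kws.map (fun k => (k, cat, r))) =
    if r < b.2 ∧ List.any kws (fun t => types.contains t) = true then (cat, r) else b := by
  induction kws generalizing b with
  | nil => simp
  | cons k rest ih =>
    simp only [List.map_cons, List.foldl_cons]
    by_cases h2 : types.contains k = true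
    · by_cases h1 : r < b.2
      · rw [if_pos ⟨h1, h2⟩, ih]
        rw [if_neg (fun hc => lt_irrefl r hc.1),
            if_pos ⟨h1, by simp only [List.any_cons, h2, Bool.true_or]⟩]
      · rw [if_neg (fun hc => h1 hc.1), ih, if_neg (fun hc => h1 hc.1), if_neg (fun hc => h1 hc.1)]
    · have hk : k ∉ types := by simpa using h2
      rw [if_neg (fun hc => h2 hc.2), ih]
      simp [List.any_cons, hk]

-- the min-rank scan of the flat index picks exactly the first category of A's elif chain
theorem pick_fst (types : List String) :
    (pvKeywordRank.foldl
      (fun (best : String × Int) (e : String × String × Int) =>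
        if e.2.2 < best.2 ∧ types.contains e.1 = true then (e.2.1, e.2.2) else best)
      ("other", 6)).1 =
    (if List.any ["museum", "art_gallery", "hindu_temple", "church", "synagogue", "mosque"] (fun t => types.contains t) then "culture"
     else if List.any ["tourist_attraction", "point_of_interest", "establishment"] (fun t => types.contains t) then "landmarks"
     else if List.any ["park", "natural_feature", "campground"] (fun t => types.contains t) then "nature"
     else if List.any ["restaurant", "cafe", "food", "bar"] (fun t => types.contains t) then "food"
     else if List.any ["shopping_mall", "store", "clothing_store"] (fun t => types.contains t) then "shopping"
     else if List.any ["night_club", "movie_theater", "casino"] (fun t => types.contains t) then "entertainment"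
     else "other") := by
  rw [pvKeywordRank_eq]
  rw [List.foldl_append, List.foldl_append, List.foldl_append, List.foldl_append, List.foldl_append]
  rw [grp_fold, grp_fold, grp_fold, grp_fold, grp_fold, grp_fold]
  by_cases h0 : ("museum" ∈ types ∨ "art_gallery" ∈ types ∨ "hindu_temple" ∈ types ∨ "church" ∈ types ∨ "synagogue" ∈ types ∨ "mosque" ∈ types)
  · simp [h0]
  by_cases h1 : ("tourist_attraction" ∈ types ∨ "point_of_interest" ∈ types ∨ "establishment" ∈ types)
  · simp [h0, h1]
  by_cases h2 : ("park" ∈ types ∨ "natural_feature" ∈ types ∨ "campground" ∈ types)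
  · simp [h0, h1, h2]
  by_cases h3 : ("restaurant" ∈ types ∨ "cafe" ∈ types ∨ "food" ∈ types ∨ "bar" ∈ types)
  · simp [h0, h1, h2, h3]
  by_cases h4 : ("shopping_mall" ∈ types ∨ "store" ∈ types ∨ "clothing_store" ∈ types)
  · simp [h0, h1, h2, h3, h4]
  by_cases h5 : ("night_club" ∈ types ∨ "movie_theater" ∈ types ∨ "casino" ∈ types)
  · simp [h0, h1, h2, h3, h4, h5]
  simp [h0, h1, h2, h3, h4, h5]

-- per-attraction: A's elif chain of bucket updates equals one update at B's picked key
theorem step_eq :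
    (fun (cats : PySem.Dict String (List (List (String × List String)))) (attraction : List (String × List String)) =>
      if List.any ["museum", "art_gallery", "hindu_temple", "church", "synagogue", "mosque"] (fun t => ((PySem.Dict.mk attraction).getD "types" []).contains t) then
        cats.modify "culture" [] (· ++ [attraction])
      else if List.any ["tourist_attraction", "point_of_interest", "establishment"] (fun t => ((PySem.Dict.mk attraction).getD "types" []).contains t) then
        cats.modify "landmarks" [] (· ++ [attraction])
      else if List.any ["park", "natural_feature", "campground"] (fun t => ((PySem.Dict.mk attraction).getD "types" []).contains t) then
        cats.modify "nature" [] (· ++ [attraction])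
      else if List.any ["restaurant", "cafe", "food", "bar"] (fun t => ((PySem.Dict.mk attraction).getD "types" []).contains t) then
        cats.modify "food" [] (· ++ [attraction])
      else if List.any ["shopping_mall", "store", "clothing_store"] (fun t => ((PySem.Dict.mk attraction).getD "types" []).contains t) then
        cats.modify "shopping" [] (· ++ [attraction])
      else if List.any ["night_club", "movie_theater", "casino"] (fun t => ((PySem.Dict.mk attraction).getD "types" []).contains t) then
        cats.modify "entertainment" [] (· ++ [attraction])
      else
        cats.modify "other" [] (· ++ [attraction])) =
    (fun (b : PySem.Dict String (List (List (String × List String)))) (attraction : List (String × List String)) =>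
      b.modify
        (pvKeywordRank.foldl
          (fun (best : String × Int) (e : String × String × Int) =>
            if e.2.2 < best.2 ∧ ((PySem.Dict.mk attraction).getD "types" []).contains e.1 = true then (e.2.1, e.2.2) else best)
          ("other", 6)).1 [] (· ++ [attraction])) := by
  funext cats attraction
  rw [pick_fst]
  by_cases h0 : ("museum" ∈ ((PySem.Dict.mk attraction).getD "types" []) ∨ "art_gallery" ∈ ((PySem.Dict.mk attraction).getD "types" []) ∨ "hindu_temple" ∈ ((PySem.Dict.mk attraction).getD "types" []) ∨ "church" ∈ ((PySem.Dict.mk attraction).getD "types" []) ∨ "synagogue" ∈ ((PySem.Dict.mk attraction).getD "types" []) ∨ "mosque" ∈ ((PySem.Dict.mk attraction).getD "types" []))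
  · simp [h0]
  by_cases h1 : ("tourist_attraction" ∈ ((PySem.Dict.mk attraction).getD "types" []) ∨ "point_of_interest" ∈ ((PySem.Dict.mk attraction).getD "types" []) ∨ "establishment" ∈ ((PySem.Dict.mk attraction).getD "types" []))
  · simp [h0, h1]
  by_cases h2 : ("park" ∈ ((PySem.Dict.mk attraction).getD "types" []) ∨ "natural_feature" ∈ ((PySem.Dict.mk attraction).getD "types" []) ∨ "campground" ∈ ((PySem.Dict.mk attraction).getD "types" []))
  · simp [h0, h1, h2]
  by_cases h3 : ("restaurant" ∈ ((PySem.Dict.mk attraction).getD "types" []) ∨ "cafe" ∈ ((PySem.Dict.mk attraction).getD "types" []) ∨ "food" ∈ ((PySem.Dict.mk attraction).getD "types" []) ∨ "bar" ∈ ((PySem.Dict.mk attraction).getD "types" []))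
  · simp [h0, h1, h2, h3]
  by_cases h4 : ("shopping_mall" ∈ ((PySem.Dict.mk attraction).getD "types" []) ∨ "store" ∈ ((PySem.Dict.mk attraction).getD "types" []) ∨ "clothing_store" ∈ ((PySem.Dict.mk attraction).getD "types" []))
  · simp [h0, h1, h2, h3, h4]
  by_cases h5 : ("night_club" ∈ ((PySem.Dict.mk attraction).getD "types" []) ∨ "movie_theater" ∈ ((PySem.Dict.mk attraction).getD "types" []) ∨ "casino" ∈ ((PySem.Dict.mk attraction).getD "types" []))
  · simp [h0, h1, h2, h3, h4, h5]
  simp [h0, h1, h2, h3, h4, h5]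

-- ===== VERDICT (by name: the statement is the Claim_ definition above) =====
theorem categorize_attractions_spec : Claim_equal_categorize_attractions := by
  intro attractions _
  unfold Spec_categorize_attractions
  simp only [categorize_attractions, categorize_attractions_alt]
  rw [step_eq]
  congr 2
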